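-- pv_equiv track=rewrite | github.com/emmetuft/CodeBuddy | front_end/content.py | get_next_prev_exercises
-- ===== SOURCE A (Python) =====
-- def get_next_prev_exercises(course, assignment, exercise, exercises):
--     prev_exercise = None
--     next_exercise = None
--
--     if len(exercises) > 0 and exercise:
--         this_exercise = [i for i in range(len(exercises)) if exercises[i][0] == int(exercise)]
--         if len(this_exercise) > 0:
--             this_exercise_index = [i for i in range(len(exercises)) if exercises[i][0] == int(exercise)][0]
--
--             if len(exercises) >= 2 and this_exercise_index != 0:
--                 prev_exercise = exercises[this_exercise_index - 1][1]
--
--             if len(exercises) >= 2 and this_exercise_index != (len(exercises) - 1):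
--                 next_exercise = exercises[this_exercise_index + 1][1]
--
--     return {"previous": prev_exercise, "next": next_exercise}
-- ===== SOURCE B (Python) =====
-- def get_next_prev_exercises(course, assignment, exercise, exercises):
--     previous = None
--     nxt = None
--     if len(exercises) > 0 and exercise:
--         target = int(exercise)
--         last = None
--         capture = False
--         for item in exercises:
--             if capture:
--                 nxt = item[1]
--                 break
--             if item[0] == target:
--                 previous = last[1] if last is not None else None
--                 capture = True
--             else:
--                 last = item
--     return {"previous": previous, "next": nxt}
-- ===== Notes on version B (the rewrite author's own statement) =====
-- stated objective: alternative
-- what changed: A builds the list of all matching indices with a range comprehension (twice) and then indexes at idx-1/idx+1 with explicit length/boundary tests; B does one sliding-window pass that tracks the previously seen element and a capture-next flag, never computing an index and stopping right after the neighbour is seen.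
-- outside the precondition, e.g. on get_next_prev_exercises('c', 'a', 'x', [(1, 'p')]): A raises ValueError, B raises ValueError
import Mathlib
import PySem

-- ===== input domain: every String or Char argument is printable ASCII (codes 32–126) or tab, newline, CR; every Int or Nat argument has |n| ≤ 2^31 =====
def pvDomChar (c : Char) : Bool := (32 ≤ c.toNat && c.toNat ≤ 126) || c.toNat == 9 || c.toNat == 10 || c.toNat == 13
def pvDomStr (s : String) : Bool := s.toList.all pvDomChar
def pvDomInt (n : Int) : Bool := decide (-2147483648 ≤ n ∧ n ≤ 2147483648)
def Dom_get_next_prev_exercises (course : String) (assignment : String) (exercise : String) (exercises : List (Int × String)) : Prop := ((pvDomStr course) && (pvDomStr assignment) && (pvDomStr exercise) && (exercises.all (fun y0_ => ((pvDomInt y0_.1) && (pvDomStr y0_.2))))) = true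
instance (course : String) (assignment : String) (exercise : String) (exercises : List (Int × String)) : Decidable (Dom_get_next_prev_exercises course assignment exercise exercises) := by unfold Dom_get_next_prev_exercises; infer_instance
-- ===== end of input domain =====

-- B replaces A's index-comprehension plus idx±1 indexing by one sliding-window pass
-- (previous element + capture-next flag) that never computes an index; same return value.

-- ===== PORT A =====
-- the comprehension [i for i in range(len(exercises)) if exercises[i][0] == t]
-- (indexing is always in range, so pyGetD's default is never read)
def aFilter (t : Int) (exercises : List (Int × String)) : List Int :=
  (PySem.List.pyRange 0 (PySem.List.len exercises) 1).filter
    (fun i => (PySem.List.pyGetD exercises i ((0 : Int), "")).1 == t)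

-- int(exercise) is only evaluated under the guard; Pre_ guarantees it parses
-- (outside Pre_ Python raises ValueError, the port's `.getD 0` value is not claimed)
def get_next_prev_exercises (course : String) (assignment : String) (exercise : String) (exercises : List (Int × String)) : List (String × Option String) :=
  let prev_exercise : Option String := none
  let next_exercise : Option String := none
  if 0 < exercises.length ∧ exercise ≠ "" then
    let this_exercise := aFilter ((PySem.Int.ofStr? exercise).getD 0) exercises
    if 0 < this_exercise.length then
      -- Python recomputes the comprehension and takes [0]
      let idx := PySem.List.pyGetD (aFilter ((PySem.Int.ofStr? exercise).getD 0) exercises) 0 0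
      let prev1 := if 2 ≤ exercises.length ∧ idx ≠ 0 then
          some (PySem.List.pyGetD exercises (idx - 1) ((0 : Int), "")).2 else prev_exercise
      let next1 := if 2 ≤ exercises.length ∧ idx ≠ PySem.List.len exercises - 1 then
          some (PySem.List.pyGetD exercises (idx + 1) ((0 : Int), "")).2 else next_exercise
      [("previous", prev1), ("next", next1)]
    else
      [("previous", prev_exercise), ("next", next_exercise)]
  else
    [("previous", prev_exercise), ("next", next_exercise)]

-- ===== PORT B =====
-- Source B's for-loop: state = (previous, last seen element, capture flag); break after setting next
def bLoop (t : Int) (previous : Option String) (last : Option (Int × String)) (capture : Bool) :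
    List (Int × String) → Option String × Option String
  | [] => (previous, none)
  | item :: rest =>
    if capture then (previous, some item.2)
    else if item.1 == t then bLoop t (last.map Prod.snd) last true rest
    else bLoop t previous (some item) false rest

def get_next_prev_exercises_alt (course : String) (assignment : String) (exercise : String) (exercises : List (Int × String)) : List (String × Option String) :=
  if 0 < exercises.length ∧ exercise ≠ "" then
    let t := (PySem.Int.ofStr? exercise).getD 0
    let r := bLoop t none none false exercises
    [("previous", r.1), ("next", r.2)]
  else
    [("previous", none), ("next", none)]

-- ===== PRECONDITION & SPEC =====
-- Pre_ excludes only the inputs where Python A raises ValueError: a nonempty list together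
-- with a nonempty exercise string that int() cannot parse.
def Pre_get_next_prev_exercises (course : String) (assignment : String) (exercise : String) (exercises : List (Int × String)) : Prop :=
  exercises = [] ∨ exercise = "" ∨ (PySem.Int.ofStr? exercise).isSome = true
instance (course : String) (assignment : String) (exercise : String) (exercises : List (Int × String)) : Decidable (Pre_get_next_prev_exercises course assignment exercise exercises) := by unfold Pre_get_next_prev_exercises; infer_instance

def pvWitness_get_next_prev_exercises : String × String × String × (List (Int × String)) :=
  ("c", "a", "2", [(1, "x"), (2, "y"), (3, "z")])

def Spec_get_next_prev_exercises (course : String) (assignment : String) (exercise : String) (exercises : List (Int × String)) (out : List (String × Option String)) : Prop := out = get_next_prev_exercises_alt course assignment exercise exercises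
instance (course : String) (assignment : String) (exercise : String) (exercises : List (Int × String)) (out : List (String × Option String)) : Decidable (Spec_get_next_prev_exercises course assignment exercise exercises out) := by unfold Spec_get_next_prev_exercises; infer_instance

-- ===== CLAIM (what is proved, stated in full; the proofs are below) =====
def Claim_equal_get_next_prev_exercises : Prop := ∀ (course : String) (assignment : String) (exercise : String) (exercises : List (Int × String)), Dom_get_next_prev_exercises course assignment exercise exercises → Pre_get_next_prev_exercises course assignment exercise exercises → Spec_get_next_prev_exercises course assignment exercise exercises (get_next_prev_exercises course assignment exercise exercises)

-- ===== LEMMAS AND PROOFS =====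

-- first index of the Nat-level comprehension = findIdx?
theorem natFilter_head (t : Int) : ∀ (xs : List (Int × String)),
    ((List.range xs.length).filter (fun k => ((xs.getD k ((0 : Int), "")).1 == t))).head? =
      xs.findIdx? (fun p => p.1 == t)
  | [] => by simp
  | x :: rest => by
    rw [List.length_cons, List.range_succ_eq_map]
    by_cases h : x.1 == t
    · simp [h, List.findIdx?_cons]
    · have hc : ((fun k => ((x :: rest).getD k ((0 : Int), "")).1 == t) ∘ Nat.succ) =
          (fun k => ((rest.getD k ((0 : Int), "")).1 == t)) := by
        funext k; simp
      simp only [List.filter_cons, List.getD_cons_zero, h, if_neg, Bool.false_eq_true,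
        not_false_eq_true, List.filter_map, hc, List.head?_map, List.findIdx?_cons,
        natFilter_head t rest]

theorem aFilter_head (t : Int) (xs : List (Int × String)) :
    (aFilter t xs).head? = (xs.findIdx? (fun p => p.1 == t)).map (fun i => (i : Int)) := by
  unfold aFilter
  rw [PySem.List.pyRange_one]
  simp only [PySem.List.len_eq, sub_zero, Int.toNat_natCast, List.filter_map, List.head?_map]
  have : ((fun i => (PySem.List.pyGetD xs i ((0 : Int), "")).1 == t) ∘ (fun k : Nat => (0 : Int) + ↑k)) =
      (fun k => ((xs.getD k ((0 : Int), "")).1 == t)) := by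
    funext k; simp [PySem.List.pyGetD_natCast]
  rw [this, natFilter_head t xs]
  cases xs.findIdx? (fun p => p.1 == t) <;> simp

-- the sliding-window loop, characterised through findIdx?
theorem bLoop_spec (t : Int) : ∀ (xs : List (Int × String)) (last : Option (Int × String)),
    bLoop t none last false xs =
      match xs.findIdx? (fun p => p.1 == t) with
      | none => (none, none)
      | some 0 => (last.map Prod.snd, xs[1]?.map Prod.snd)
      | some (i + 1) => (xs[i]?.map Prod.snd, xs[i + 2]?.map Prod.snd)
  | [], last => by simp [bLoop]
  | x :: rest, last => by
    by_cases h : x.1 == t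
    · simp only [bLoop, h, if_true, if_false, Bool.false_eq_true, List.findIdx?_cons]
      cases rest with
      | nil => simp [bLoop]
      | cons y ys => simp [bLoop]
    · simp only [bLoop, h, if_false, Bool.false_eq_true, List.findIdx?_cons]
      rw [bLoop_spec t rest (some x)]
      cases hfi : rest.findIdx? (fun p => p.1 == t) with
      | none => simp
      | some i =>
        cases i with
        | zero => simp
        | succ j => simp

-- A's guarded body (first index via the comprehension, then idx±1 indexing) equals B's sliding window
theorem core_eq (t : Int) (xs : List (Int × String)) :
    (if 0 < (aFilter t xs).length then
      ((if 2 ≤ xs.length ∧ (PySem.List.pyGetD (aFilter t xs) 0 0) ≠ 0 then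
          some (PySem.List.pyGetD xs ((PySem.List.pyGetD (aFilter t xs) 0 0) - 1) ((0 : Int), "")).2 else none),
       (if 2 ≤ xs.length ∧ (PySem.List.pyGetD (aFilter t xs) 0 0) ≠ PySem.List.len xs - 1 then
          some (PySem.List.pyGetD xs ((PySem.List.pyGetD (aFilter t xs) 0 0) + 1) ((0 : Int), "")).2 else none))
     else (none, none))
    = bLoop t none none false xs := by
  rw [bLoop_spec t xs none]
  cases hfi : xs.findIdx? (fun p => p.1 == t) with
  | none =>
    have hh : (aFilter t xs).head? = none := by rw [aFilter_head, hfi]; rfl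
    have hnil : aFilter t xs = [] := by
      cases hFa : aFilter t xs with
      | nil => rfl
      | cons a as => rw [hFa] at hh; simp at hh
    rw [hnil]; simp
  | some i =>
    have hi : i < xs.length := (List.findIdx?_eq_some_iff_findIdx_eq.mp hfi).1
    have hh : (aFilter t xs).head? = some (i : Int) := by rw [aFilter_head, hfi]; rfl
    obtain ⟨y, ys, hF⟩ := List.exists_cons_of_ne_nil
      (show aFilter t xs ≠ [] by intro h; rw [h] at hh; simp at hh)
    have hy : y = (i : Int) := by rw [hF] at hh; simpa using hh
    have hidx : PySem.List.pyGetD (aFilter t xs) 0 0 = (i : Int) := by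
      rw [hF, hy, PySem.List.pyGetD_zero_cons]
    have hpos : 0 < (aFilter t xs).length := by rw [hF]; simp
    rw [if_pos hpos, hidx]
    cases i with
    | zero =>
      show _ = (Option.map Prod.snd (none : Option (Int × String)), Option.map Prod.snd xs[1]?)
      refine congrArg₂ Prod.mk ?_ ?_
      · rw [if_neg (by simp)]
        rfl
      · by_cases hl : ((0 : Nat) : Int) = PySem.List.len xs - 1
        · have h1 : xs.length = 1 := by
            simp only [PySem.List.len_eq] at hl; omega
          rw [if_neg (fun hc => hc.2 hl)]
          simp [List.getElem?_eq_none_iff.mpr (show xs.length ≤ 1 by omega)]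
        · have h2 : 2 ≤ xs.length := by
            simp only [PySem.List.len_eq] at hl; omega
          rw [if_pos ⟨h2, hl⟩]
          have e1 : (((0 : Nat) : Int) + 1) = ((1 : Nat) : Int) := by norm_num
          have hb : 1 < xs.length := by omega
          rw [e1, PySem.List.pyGetD_natCast]
          simp [List.getElem?_eq_getElem hb]
    | succ j =>
      have h2 : 2 ≤ xs.length := by omega
      show _ = (Option.map Prod.snd xs[j]?, Option.map Prod.snd xs[j + 2]?)
      refine congrArg₂ Prod.mk ?_ ?_
      · have hne : ((j + 1 : Nat) : Int) ≠ 0 := by push_cast; omega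
        rw [if_pos ⟨h2, hne⟩]
        have e1 : (((j + 1 : Nat) : Int) - 1) = ((j : Nat) : Int) := by push_cast; omega
        have hb : j < xs.length := by omega
        rw [e1, PySem.List.pyGetD_natCast]
        simp [List.getElem?_eq_getElem hb]
      · by_cases hl : ((j + 1 : Nat) : Int) = PySem.List.len xs - 1
        · have h1 : xs.length = j + 2 := by
            simp only [PySem.List.len_eq] at hl; omega
          rw [if_neg (fun hc => hc.2 hl)]
          simp [List.getElem?_eq_none_iff.mpr (show xs.length ≤ j + 2 by omega)]
        · have hjl : j + 2 < xs.length := by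
            simp only [PySem.List.len_eq] at hl; omega
          rw [if_pos ⟨h2, hl⟩]
          have e1 : (((j + 1 : Nat) : Int) + 1) = ((j + 2 : Nat) : Int) := by push_cast; omega
          rw [e1, PySem.List.pyGetD_natCast]
          simp [List.getElem?_eq_getElem hjl]

-- ===== VERDICT (by name: the statement is the Claim_ definition above) =====
theorem get_next_prev_exercises_spec : Claim_equal_get_next_prev_exercises := by
  intro course assignment exercise exercises _ _
  unfold Spec_get_next_prev_exercises get_next_prev_exercises get_next_prev_exercises_alt
  by_cases hg : 0 < exercises.length ∧ exercise ≠ ""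
  · rw [if_pos hg, if_pos hg]
    show (if 0 < (aFilter ((PySem.Int.ofStr? exercise).getD 0) exercises).length then
        [("previous", if 2 ≤ exercises.length ∧ PySem.List.pyGetD (aFilter ((PySem.Int.ofStr? exercise).getD 0) exercises) 0 0 ≠ 0 then some (PySem.List.pyGetD exercises (PySem.List.pyGetD (aFilter ((PySem.Int.ofStr? exercise).getD 0) exercises) 0 0 - 1) ((0 : Int), "")).2 else none),
         ("next", if 2 ≤ exercises.length ∧ PySem.List.pyGetD (aFilter ((PySem.Int.ofStr? exercise).getD 0) exercises) 0 0 ≠ PySem.List.len exercises - 1 then some (PySem.List.pyGetD exercises (PySem.List.pyGetD (aFilter ((PySem.Int.ofStr? exercise).getD 0) exercises) 0 0 + 1) ((0 : Int), "")).2 else none)]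
      else [("previous", none), ("next", none)])
      = [("previous", (bLoop ((PySem.Int.ofStr? exercise).getD 0) none none false exercises).1),
         ("next", (bLoop ((PySem.Int.ofStr? exercise).getD 0) none none false exercises).2)]
    rw [← core_eq ((PySem.Int.ofStr? exercise).getD 0) exercises]
    by_cases hF : 0 < (aFilter ((PySem.Int.ofStr? exercise).getD 0) exercises).length
    · rw [if_pos hF, if_pos hF]
    · rw [if_neg hF, if_neg hF]
  · rw [if_neg hg, if_neg hg]
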